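-- pv_equiv track=rewrite | github.com/YksYiZov/Personality-Classifying | Data.py | classifier_data
-- ===== SOURCE A (Python) =====
-- def classifier_data(train, number):
--     classification = [[] for i in range(8)]
--     true_labels = ["I", "S", "T", "J"]
--
--     if number > len(train[0]):
--         number = -1
--     for words, label in zip(train[0][0 : number], train[1][0 : number]):
--         for i in range(4):
--             if label[i] == true_labels[i]:
--                 classification[i * 2].append(words)
--             else:
--                 classification[i * 2 + 1].append(words)
--
--     return classification
-- ===== SOURCE B (Python) =====
-- def classifier_data(train, number):
--     n = -1 if number > len(train[0]) else number
--     pairs = list(zip(train[0][0:n], train[1][0:n]))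
--     true_labels = ["I", "S", "T", "J"]
--     classification = []
--     for i in range(4):
--         classification.append([w for w, l in pairs if l[i] == true_labels[i]])
--         classification.append([w for w, l in pairs if l[i] != true_labels[i]])
--     return classification
-- ===== Notes on version B (the rewrite author's own statement) =====
-- stated objective: alternative
-- what changed: B replaces A's single pass with inner per-element branching into 8 accumulating buckets by first materializing the zipped slice once and then running four independent filter passes (two comprehensions per label position) that build each bucket directly.
import Mathlib
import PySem

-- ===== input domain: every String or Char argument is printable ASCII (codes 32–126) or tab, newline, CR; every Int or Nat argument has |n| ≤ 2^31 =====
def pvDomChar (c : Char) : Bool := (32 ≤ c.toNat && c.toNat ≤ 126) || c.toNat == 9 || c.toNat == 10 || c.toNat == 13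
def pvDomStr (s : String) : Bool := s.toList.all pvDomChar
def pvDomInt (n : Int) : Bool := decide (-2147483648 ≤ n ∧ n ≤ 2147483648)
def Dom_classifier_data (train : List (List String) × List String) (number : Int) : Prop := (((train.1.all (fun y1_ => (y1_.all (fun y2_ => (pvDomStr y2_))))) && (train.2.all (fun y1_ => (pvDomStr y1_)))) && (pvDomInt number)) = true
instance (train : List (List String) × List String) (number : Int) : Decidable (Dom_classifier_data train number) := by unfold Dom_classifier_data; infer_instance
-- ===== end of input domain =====

-- B buckets the zipped slice with four independent per-position filter passes instead of A's
-- single pass that branches into all 8 buckets per element; same outputs, alternative decomposition.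

-- ===== PORT A =====
-- label[i] == true_labels[i]: Python compares 1-char strings; ported as the char at index i.
def pvTestA (label : String) (i : Nat) : Bool :=
  PySem.Str.pyGet? label (i : Int) == PySem.List.pyGet? ['I', 'S', 'T', 'J'] (i : Int)

def classifier_data (train : List (List String) × List String) (number : Int) : List (List (List String)) :=
  let classification : List (List (List String)) := [[], [], [], [], [], [], [], []]
  let number' : Int := if number > (train.1.length : Int) then -1 else number
  ((PySem.List.slice train.1 (some 0) (some number')).zip
      (PySem.List.slice train.2 (some 0) (some number'))).foldl
    (fun c wl =>
      (List.range 4).foldl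
        (fun c i =>
          if pvTestA wl.2 i then c.modify (i * 2) (fun b => b ++ [wl.1])
          else c.modify (i * 2 + 1) (fun b => b ++ [wl.1]))
        c)
    classification

-- ===== PORT B =====
def classifier_data_alt (train : List (List String) × List String) (number : Int) : List (List (List String)) :=
  let n : Int := if number > (train.1.length : Int) then -1 else number
  let pairs := (PySem.List.slice train.1 (some 0) (some n)).zip
      (PySem.List.slice train.2 (some 0) (some n))
  (List.range 4).foldl
    (fun cl i =>
      cl ++ [(pairs.filter (fun wl => PySem.Str.pyGet? wl.2 (i : Int) == PySem.List.pyGet? ['I', 'S', 'T', 'J'] (i : Int))).map Prod.fst,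
             (pairs.filter (fun wl => !(PySem.Str.pyGet? wl.2 (i : Int) == PySem.List.pyGet? ['I', 'S', 'T', 'J'] (i : Int)))).map Prod.fst])
    []

-- ===== PRECONDITION & SPEC =====
-- Pre_ excludes exactly the inputs on which Python A raises an IndexError: a label string of
-- length < 4 among the pairs actually iterated (the zip of the two slices).
def Pre_classifier_data (train : List (List String) × List String) (number : Int) : Prop :=
  let n : Int := if number > (train.1.length : Int) then -1 else number
  ∀ l ∈ List.take (PySem.List.slice train.1 (some 0) (some n)).length
      (PySem.List.slice train.2 (some 0) (some n)), 4 ≤ PySem.Str.len l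
instance (train : List (List String) × List String) (number : Int) : Decidable (Pre_classifier_data train number) := by unfold Pre_classifier_data; infer_instance

def pvWitness_classifier_data : (List (List String) × List String) × Int := ((([["a"], ["b"]]), ["ISTJ", "ESFP"]), 2)

def Spec_classifier_data (train : List (List String) × List String) (number : Int) (out : List (List (List String))) : Prop := out = classifier_data_alt train number
instance (train : List (List String) × List String) (number : Int) (out : List (List (List String))) : Decidable (Spec_classifier_data train number out) := by unfold Spec_classifier_data; infer_instance

-- ===== CLAIM (what is proved, stated in full; the proofs are below) =====
def Claim_equal_classifier_data : Prop := ∀ (train : List (List String) × List String) (number : Int), Dom_classifier_data train number → Pre_classifier_data train number → Spec_classifier_data train number (classifier_data train number)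

-- ===== LEMMAS AND PROOFS =====

-- A's fold over the pairs, starting from arbitrary bucket contents, appends to each bucket
-- exactly the corresponding filtered projection.
theorem pvStepA (p : List String × String) (a0 a1 a2 a3 a4 a5 a6 a7 : List (List String)) :
    (List.range 4).foldl
      (fun c i =>
        if pvTestA p.2 i then c.modify (i * 2) (fun b => b ++ [p.1])
        else c.modify (i * 2 + 1) (fun b => b ++ [p.1]))
      [a0, a1, a2, a3, a4, a5, a6, a7] =
      [if pvTestA p.2 0 then a0 ++ [p.1] else a0,
       if pvTestA p.2 0 then a1 else a1 ++ [p.1],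
       if pvTestA p.2 1 then a2 ++ [p.1] else a2,
       if pvTestA p.2 1 then a3 else a3 ++ [p.1],
       if pvTestA p.2 2 then a4 ++ [p.1] else a4,
       if pvTestA p.2 2 then a5 else a5 ++ [p.1],
       if pvTestA p.2 3 then a6 ++ [p.1] else a6,
       if pvTestA p.2 3 then a7 else a7 ++ [p.1]] := by
  rw [show (List.range 4) = [0, 1, 2, 3] from rfl]
  by_cases h0 : pvTestA p.2 0 <;> by_cases h1 : pvTestA p.2 1 <;>
    by_cases h2 : pvTestA p.2 2 <;> by_cases h3 : pvTestA p.2 3 <;>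
    simp [h0, h1, h2, h3, List.modify]

theorem pvFoldA_eq (ps : List (List String × String))
    (a0 a1 a2 a3 a4 a5 a6 a7 : List (List String)) :
    ps.foldl
      (fun c wl =>
        (List.range 4).foldl
          (fun c i =>
            if pvTestA wl.2 i then c.modify (i * 2) (fun b => b ++ [wl.1])
            else c.modify (i * 2 + 1) (fun b => b ++ [wl.1]))
          c)
      [a0, a1, a2, a3, a4, a5, a6, a7] =
      [a0 ++ (ps.filter (fun wl => pvTestA wl.2 0)).map Prod.fst,
       a1 ++ (ps.filter (fun wl => !pvTestA wl.2 0)).map Prod.fst,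
       a2 ++ (ps.filter (fun wl => pvTestA wl.2 1)).map Prod.fst,
       a3 ++ (ps.filter (fun wl => !pvTestA wl.2 1)).map Prod.fst,
       a4 ++ (ps.filter (fun wl => pvTestA wl.2 2)).map Prod.fst,
       a5 ++ (ps.filter (fun wl => !pvTestA wl.2 2)).map Prod.fst,
       a6 ++ (ps.filter (fun wl => pvTestA wl.2 3)).map Prod.fst,
       a7 ++ (ps.filter (fun wl => !pvTestA wl.2 3)).map Prod.fst] := by
  induction ps generalizing a0 a1 a2 a3 a4 a5 a6 a7 with
  | nil => simp
  | cons p ps ih =>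
    simp only [List.foldl_cons]
    rw [pvStepA, ih]
    simp only [List.filter_cons]
    split_ifs <;> simp_all

-- ===== VERDICT (by name: the statement is the Claim_ definition above) =====
theorem classifier_data_spec : Claim_equal_classifier_data := by
  intro train number _ _
  unfold Spec_classifier_data classifier_data classifier_data_alt
  rw [pvFoldA_eq]
  simp only [show (List.range 4) = [0, 1, 2, 3] from rfl, List.foldl_cons, List.foldl_nil,
    pvTestA]
  simp
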